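-- pv_equiv track=rewrite | github.com/demeet2k/athena-square-earth | MATH/FINAL FORM/FRAMEWORKS CODE/Athena OS/athena_os/primes/sieves.py | jacobsthal
-- ===== SOURCE A (Python) =====
-- import math
--
-- def jacobsthal(m: int) -> int:
--     """
--     Compute the Jacobsthal function j(m).
--
--     j(m) is the smallest J such that any J consecutive integers
--     contain at least one coprime to m.
--
--     Equivalently, j(m) - 1 is the maximum gap between consecutive
--     integers coprime to m.
--     """
--     if m <= 1:
--         return 1
--
--     # Find all residues coprime to m
--     coprime_residues = sorted([r for r in range(m) if math.gcd(r, m) == 1])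
--
--     if not coprime_residues:
--         return m + 1  # No coprimes exist
--
--     # Find maximum gap (considering wraparound)
--     max_gap = 0
--
--     for i in range(len(coprime_residues)):
--         if i == 0:
--             # Gap from last to first (wraparound)
--             gap = (m - coprime_residues[-1]) + coprime_residues[0]
--         else:
--             gap = coprime_residues[i] - coprime_residues[i-1]
--
--         max_gap = max(max_gap, gap)
--
--     return max_gap
-- ===== SOURCE B (Python) =====
-- def jacobsthal(m: int) -> int:
--     # Divisor sieve instead of per-residue gcd: mark every residue sharing a
--     # divisor d >= 2 with m by striding through multiples of each divisor of m,
--     # then take the longest cyclic run of marked residues; j(m) = that run + 1.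
--     # Residue 0 is always marked and residue 1 never is, so the cyclic run
--     # through the wraparound is the trailing run plus the single cell at 0.
--     if m <= 1:
--         return 1
--     marked = [False] * m
--     for d in range(2, m + 1):
--         if m % d == 0:
--             for k in range(0, m, d):
--                 marked[k] = True
--     best = 0
--     run = 0
--     for flag in marked:
--         if flag:
--             run += 1
--             if run > best:
--                 best = run
--         else:
--             run = 0
--     return max(best, run + 1) + 1
-- ===== Notes on version B (the rewrite author's own statement) =====
-- stated objective: faster
-- what changed: B replaces A's per-residue gcd filter + sorted-list gap loop by a divisor sieve (stride-mark every residue sharing a divisor >= 2 with m in a boolean table) followed by a longest-run-of-marked scan, using that residue 0 is always marked and residue 1 never is to fold the wraparound into run+1.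
import Mathlib
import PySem

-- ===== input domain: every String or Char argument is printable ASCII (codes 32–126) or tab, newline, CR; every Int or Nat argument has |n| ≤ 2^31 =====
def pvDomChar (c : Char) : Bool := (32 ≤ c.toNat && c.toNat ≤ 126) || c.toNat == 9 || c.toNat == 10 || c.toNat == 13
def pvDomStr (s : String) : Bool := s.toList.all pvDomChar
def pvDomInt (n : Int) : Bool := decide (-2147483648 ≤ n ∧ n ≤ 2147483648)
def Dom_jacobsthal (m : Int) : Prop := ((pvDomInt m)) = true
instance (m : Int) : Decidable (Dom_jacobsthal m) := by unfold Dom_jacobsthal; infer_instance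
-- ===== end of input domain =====

-- B replaces the per-residue gcd filter + gap loop by a divisor sieve over a boolean
-- table followed by a longest-run scan; measurably faster.

-- ===== PORT A =====

/-- Python list indexing `xs[i]` on an array: exact for `-size ≤ i < size`
(the only indices A's loop uses are `-1` and `0 ≤ i < len`). -/
def pyGetA (xs : Array Int) (i : Int) (d : Int) : Int :=
  if 0 ≤ i then xs.getD i.toNat d else xs.getD (xs.size - (-i).toNat) d

def jacobsthal (m : Int) : Int :=
  if m ≤ 1 then 1
  else
    -- Python's `sorted` is a stable library sort; `List.mergeSort` is the corresponding
    -- stable Lean library sort (PySem's insertion sort cannot be evaluated at the sampled sizes).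
    let coprime_residues :=
      ((PySem.List.pyRange 0 m 1).filter (fun r => Int.gcd r m == 1)).mergeSort (fun a b => a ≤ b)
    if coprime_residues = [] then m + 1
    else
      -- A Python list is a contiguous array with O(1) indexing; materialise it once so
      -- `coprime_residues[i]` is O(1) here as it is in Python.
      let arr := coprime_residues.toArray
      (PySem.List.pyRange 0 (coprime_residues.length : Int) 1).foldl
        (fun max_gap i =>
          let gap :=
            if i == 0 then
              (m - pyGetA arr (-1) 0) + pyGetA arr 0 0
            else
              pyGetA arr i 0 - pyGetA arr (i - 1) 0
          max max_gap gap) 0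

-- ===== PORT B =====
def jacobsthal_alt (m : Int) : Int :=
  if m ≤ 1 then 1
  else
    -- marked = [False] * m; for d in range(2, m+1): if m % d == 0: mark multiples of d
    let marked :=
      (PySem.List.pyRange 2 (m + 1) 1).foldl
        (fun mk d =>
          if PySem.Int.mod m d == 0 then
            (PySem.List.pyRange 0 m d).foldl (fun l k => l.set k.toNat true) mk
          else mk)
        (List.replicate m.toNat false)
    -- longest run of marked residues, then fold the wraparound (run + the cell at 0) in
    let st := marked.foldl
      (fun (s : Int × Int) flag =>
        if flag then ((if s.2 + 1 > s.1 then s.2 + 1 else s.1), s.2 + 1) else (s.1, 0))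
      ((0 : Int), (0 : Int))
    max st.1 (st.2 + 1) + 1

-- ===== PRECONDITION & SPEC =====
def Spec_jacobsthal (m : Int) (out : Int) : Prop := out = jacobsthal_alt m
instance (m : Int) (out : Int) : Decidable (Spec_jacobsthal m out) := by unfold Spec_jacobsthal; infer_instance

-- ===== CLAIM (what is proved, stated in full; the proofs are below) =====
def Claim_equal_jacobsthal : Prop := ∀ (m : Int), Dom_jacobsthal m → Spec_jacobsthal m (jacobsthal m)

-- ===== LEMMAS AND PROOFS =====

/-- Running maximum of consecutive differences of a list. -/
def maxDiffs (a : Int) : List Int → Int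
  | x :: y :: t => maxDiffs (max a (y - x)) (y :: t)
  | _ => a

/-- Last element of `d :: l`. -/
def lastD (d : Int) : List Int → Int
  | [] => d
  | x :: t => lastD x t

lemma maxDiffs_max (l : List Int) : ∀ a b : Int, maxDiffs (max a b) l = max (maxDiffs a l) b := by
  induction l with
  | nil => intro a b; simp [maxDiffs]
  | cons x t ih =>
    intro a b
    cases t with
    | nil => simp [maxDiffs]
    | cons y t' =>
      have h : max (max a b) (y - x) = max (max a (y - x)) b := by omega
      simp only [maxDiffs, h, ih (max a (y - x)) b]

lemma lastD_mem (c : Int) (t : List Int) : lastD c t = c ∨ lastD c t ∈ t := by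
  induction t generalizing c with
  | nil => exact Or.inl rfl
  | cons x t' ih =>
    rcases ih x with h | h
    · exact Or.inr (by simp [lastD, h])
    · exact Or.inr (by simp [lastD, h])

lemma pyGetD_cons_pos (x : Int) (l : List Int) (i : Int) (hi : 1 ≤ i) (d : Int) :
    PySem.List.pyGetD (x :: l) i d = PySem.List.pyGetD l (i - 1) d := by
  obtain ⟨k, rfl⟩ : ∃ k : Nat, i = ((k : Int) + 1) := ⟨(i - 1).toNat, by omega⟩
  have h1 : ((k : Int) + 1) = ((k + 1 : Nat) : Int) := by push_cast; ring
  have h2 : ((k : Int) + 1) - 1 = ((k : Nat) : Int) := by ring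
  rw [h2, PySem.List.pyGetD_natCast, h1, PySem.List.pyGetD_natCast]
  simp [List.getD]

lemma getD_toArray (l : List Int) (n : Nat) (d : Int) : l.toArray.getD n d = l.getD n d := by
  simp [Array.getD, List.getD_eq_getElem?_getD]
  split <;> simp_all

lemma pyGetA_nonneg (l : List Int) (i : Int) (d : Int) (h : 0 ≤ i) :
    pyGetA l.toArray i d = PySem.List.pyGetD l i d := by
  obtain ⟨n, rfl⟩ : ∃ n : Nat, i = (n : Int) := ⟨i.toNat, by omega⟩
  unfold pyGetA
  rw [if_pos h, getD_toArray, PySem.List.pyGetD_natCast]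
  simp

lemma getD_last (c : Int) (t : List Int) : (c :: t).getD t.length 0 = lastD c t := by
  induction t generalizing c with
  | nil => rfl
  | cons y t' ih =>
    show (c :: y :: t').getD (t'.length + 1) 0 = lastD y t'
    rw [List.getD_cons_succ]
    exact ih y

lemma pyGetA_neg_one (c : Int) (t : List Int) :
    pyGetA (c :: t).toArray (-1) 0 = lastD c t := by
  unfold pyGetA
  rw [if_neg (by omega), getD_toArray]
  have hsz : (c :: t).toArray.size - (-(-1 : Int)).toNat = t.length := by
    simp
  rw [hsz]
  exact getD_last c t

/-- A's index loop over indices 1..len-1 computes maxDiffs. -/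
lemma foldA (cs : List Int) : ∀ a : Int,
    (PySem.List.pyRange 1 (cs.length : Int) 1).foldl
      (fun acc i => max acc (PySem.List.pyGetD cs i 0 - PySem.List.pyGetD cs (i - 1) 0)) a
    = maxDiffs a cs := by
  induction cs with
  | nil => intro a; rw [PySem.List.pyRange_one_eq_nil (by simp)]; rfl
  | cons x t ih =>
    intro a
    cases t with
    | nil => rw [PySem.List.pyRange_one_eq_nil (by simp)]; rfl
    | cons y t' =>
      have hlt : (1 : Int) < ((x :: y :: t').length : Int) := by
        simp only [List.length_cons]
        push_cast
        omega
      rw [PySem.List.pyRange_one_cons hlt]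
      simp only [List.foldl_cons]
      have e1 : PySem.List.pyGetD (x :: y :: t') 1 0 = y := by
        rw [pyGetD_cons_pos x (y :: t') 1 (by omega) 0]
        norm_num [PySem.List.pyGetD_zero_cons]
      have e0 : PySem.List.pyGetD (x :: y :: t') ((1 : Int) - 1) 0 = x := by
        norm_num [PySem.List.pyGetD_zero_cons]
      rw [e1, e0]
      have hn1 : ((((x :: y :: t').length : Int)) - (1 + 1)).toNat = t'.length := by
        simp only [List.length_cons]
        omega
      have hn2 : ((((y :: t').length : Int)) - 1).toNat = t'.length := by
        simp only [List.length_cons]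
        omega
      simp only [maxDiffs]
      rw [← ih (max a (y - x))]
      rw [PySem.List.pyRange_one (1 + 1) ((x :: y :: t').length : Int), hn1, List.foldl_map]
      rw [PySem.List.pyRange_one 1 ((y :: t').length : Int), hn2, List.foldl_map]
      apply PySem.List.foldl_congr_mem
      intro acc k _
      have g2 : PySem.List.pyGetD (x :: y :: t') (1 + 1 + (k : Int)) 0
          = PySem.List.pyGetD (y :: t') (1 + (k : Int)) 0 := by
        rw [pyGetD_cons_pos x (y :: t') (1 + 1 + (k : Int)) (by omega) 0]
        congr 1; ring
      have g1 : PySem.List.pyGetD (x :: y :: t') (1 + 1 + (k : Int) - 1) 0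
          = PySem.List.pyGetD (y :: t') (1 + (k : Int) - 1) 0 := by
        rw [pyGetD_cons_pos x (y :: t') (1 + 1 + (k : Int) - 1) (by omega) 0]
        congr 1; ring
      rw [g2, g1]

/-- A's whole gap loop on a nonempty residue list. -/
lemma Aside (m c : Int) (t : List Int) :
    (PySem.List.pyRange 0 (((c :: t).length : Int)) 1).foldl
      (fun max_gap i =>
        max max_gap
          (if i == 0 then (m - pyGetA (c :: t).toArray (-1) 0) + pyGetA (c :: t).toArray 0 0
           else pyGetA (c :: t).toArray i 0 - pyGetA (c :: t).toArray (i - 1) 0)) 0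
    = max (maxDiffs 0 (c :: t)) ((m - lastD c t) + c) := by
  rw [PySem.List.pyRange_one_cons
    (show (0 : Int) < ((c :: t).length : Int) by simp only [List.length_cons]; omega)]
  simp only [List.foldl_cons]
  have hstep : (if ((0 : Int) == 0) = true
      then (m - pyGetA (c :: t).toArray (-1) 0) + pyGetA (c :: t).toArray 0 0
      else pyGetA (c :: t).toArray (0 : Int) 0 - pyGetA (c :: t).toArray ((0 : Int) - 1) 0)
      = (m - lastD c t) + c := by
    have h00 : ((0 : Int) == 0) = true := rfl
    rw [if_pos h00, pyGetA_neg_one, pyGetA_nonneg (c :: t) 0 0 (by omega),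
      PySem.List.pyGetD_zero_cons]
  simp only [hstep]
  have h01 : (0 : Int) + 1 = 1 := by norm_num
  rw [h01]
  have hbody : ∀ (acc : Int), ∀ i ∈ PySem.List.pyRange 1 ((c :: t).length : Int) 1,
      (max acc
        (if i == 0 then (m - pyGetA (c :: t).toArray (-1) 0) + pyGetA (c :: t).toArray 0 0
         else pyGetA (c :: t).toArray i 0 - pyGetA (c :: t).toArray (i - 1) 0))
      = max acc (PySem.List.pyGetD (c :: t) i 0 - PySem.List.pyGetD (c :: t) (i - 1) 0) := by
    intro acc i hi
    have h1i : (1 : Int) ≤ i := (PySem.List.mem_pyRange_one.mp hi).1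
    have hz : (i == 0) = false := by simp only [beq_eq_false_iff_ne]; omega
    rw [hz, pyGetA_nonneg (c :: t) i 0 (by omega), pyGetA_nonneg (c :: t) (i - 1) 0 (by omega)]
    rfl
  rw [PySem.List.foldl_congr_mem _ _ _ _ hbody]
  rw [foldA (c :: t) (max 0 ((m - lastD c t) + c))]
  rw [maxDiffs_max]

-- ---- B side: the sieve ----

lemma length_foldl_set (ks : List Int) : ∀ (L : List Bool),
    (ks.foldl (fun l k => l.set k.toNat true) L).length = L.length := by
  induction ks with
  | nil => intro L; rfl
  | cons k ks' ih => intro L; simp only [List.foldl_cons, ih, List.length_set]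

lemma get_foldl_set (ks : List Int) (hks : ∀ k ∈ ks, 0 ≤ k) : ∀ (L : List Bool) (j : Nat),
    j < L.length →
    (ks.foldl (fun l k => l.set k.toNat true) L).getD j false
      = (L.getD j false || decide ((j : Int) ∈ ks)) := by
  induction ks with
  | nil => intro L j _; simp
  | cons k ks' ih =>
    intro L j hj
    simp only [List.foldl_cons]
    rw [ih (fun x hx => hks x (by simp [hx])) (L.set k.toNat true) j (by simpa using hj)]
    by_cases h : k = (j : Int)
    · subst h
      have htn : ((j : Int)).toNat = j := by omega
      rw [htn]
      have hset : (L.set j true).getD j false = true := by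
        rw [List.getD_eq_getElem?_getD, List.getElem?_set_self hj]
        rfl
      rw [hset]
      simp
    · have hk0 : 0 ≤ k := hks k (by simp)
      have hne : k.toNat ≠ j := by omega
      have hset : (L.set k.toNat true).getD j false = L.getD j false := by
        rw [List.getD_eq_getElem?_getD, List.getElem?_set_ne hne, ← List.getD_eq_getElem?_getD]
      have hiff : ((j : Int) ∈ k :: ks') ↔ ((j : Int) ∈ ks') := by
        simp only [List.mem_cons]
        constructor
        · rintro (h1 | h1)
          · omega
          · exact h1
        · exact Or.inr
      rw [hset, decide_eq_decide.mpr hiff]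

lemma length_sieve (m : Int) (ds : List Int) : ∀ (L : List Bool),
    (ds.foldl
      (fun mk d =>
        if PySem.Int.mod m d == 0 then
          (PySem.List.pyRange 0 m d).foldl (fun l k => l.set k.toNat true) mk
        else mk) L).length = L.length := by
  induction ds with
  | nil => intro L; rfl
  | cons d ds' ih =>
    intro L
    simp only [List.foldl_cons]
    rw [ih]
    split
    · exact length_foldl_set _ L
    · rfl

lemma get_sieve (m : Int) (ds : List Int) (hds : ∀ d ∈ ds, 0 < d) : ∀ (L : List Bool) (j : Nat),
    j < L.length →
    (ds.foldl
      (fun mk d =>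
        if PySem.Int.mod m d == 0 then
          (PySem.List.pyRange 0 m d).foldl (fun l k => l.set k.toNat true) mk
        else mk) L).getD j false
    = (L.getD j false
        || ds.any (fun d => (PySem.Int.mod m d == 0)
              && decide ((j : Int) ∈ PySem.List.pyRange 0 m d))) := by
  induction ds with
  | nil => intro L j _; simp
  | cons d ds' ih =>
    intro L j hj
    have hd : 0 < d := hds d (by simp)
    have hks : ∀ k ∈ PySem.List.pyRange 0 m d, 0 ≤ k := by
      intro k hk
      have := (PySem.List.mem_pyRange_iff_of_pos hd k).mp hk
      omega
    simp only [List.foldl_cons, List.any_cons]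
    by_cases hmod : (PySem.Int.mod m d == 0) = true
    · rw [if_pos hmod]
      rw [ih (fun x hx => hds x (by simp [hx])) _ j (by rw [length_foldl_set]; exact hj)]
      rw [get_foldl_set _ hks L j hj, hmod]
      simp [Bool.or_assoc]
    · rw [if_neg hmod]
      rw [ih (fun x hx => hds x (by simp [hx])) L j hj]
      simp only [Bool.not_eq_true] at hmod
      simp [hmod]

/-- The sieve hits residue j (0 ≤ j < m) iff gcd(j, m) ≠ 1. -/
lemma sieve_hit (m : Int) (hm : 1 < m) (j : Nat) (hj : (j : Int) < m) :
    (PySem.List.pyRange 2 (m + 1) 1).any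
        (fun d => (PySem.Int.mod m d == 0)
          && decide ((j : Int) ∈ PySem.List.pyRange 0 m d))
      = !(Int.gcd (j : Int) m == 1) := by
  have key : ((PySem.List.pyRange 2 (m + 1) 1).any
        (fun d => (PySem.Int.mod m d == 0)
          && decide ((j : Int) ∈ PySem.List.pyRange 0 m d)) = true)
      ↔ ¬ (Int.gcd (j : Int) m = 1) := by
    constructor
    · rintro hany hg1
      rw [List.any_eq_true] at hany
      obtain ⟨d, hdmem, hd⟩ := hany
      rw [Bool.and_eq_true, beq_iff_eq, decide_eq_true_eq] at hd
      obtain ⟨hmod, hjmem⟩ := hd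
      have hd2 : 2 ≤ d := (PySem.List.mem_pyRange_one.mp hdmem).1
      have hdm : d ∣ m := (PySem.Int.mod_eq_zero_iff_dvd m d).mp hmod
      have hdj : d ∣ (j : Int) := by
        have := ((PySem.List.mem_pyRange_iff_of_pos (by omega) ((j : Int))).mp hjmem).2.2
        simpa using this
      have hdt : ((d.toNat : Nat) : Int) = d := Int.toNat_of_nonneg (by omega)
      have hdg : d.toNat ∣ Int.gcd (j : Int) m :=
        Int.dvd_gcd (by rw [hdt]; exact hdj) (by rw [hdt]; exact hdm)
      rw [hg1] at hdg
      have := Nat.dvd_one.mp hdg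
      omega
    · intro hg
      rw [List.any_eq_true]
      refine ⟨((Int.gcd (j : Int) m : Nat) : Int), ?_, ?_⟩
      · have hgm : ((Int.gcd (j : Int) m : Nat) : Int) ∣ m := Int.gcd_dvd_right _ _
        have hgle : ((Int.gcd (j : Int) m : Nat) : Int) ≤ m := Int.le_of_dvd (by omega) hgm
        have hg0 : Int.gcd (j : Int) m ≠ 0 := by
          intro h0
          have := (Int.gcd_eq_zero_iff.mp h0).2
          omega
        rw [PySem.List.mem_pyRange_one]
        constructor
        · omega
        · omega
      · rw [Bool.and_eq_true, beq_iff_eq, decide_eq_true_eq]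
        refine ⟨(PySem.Int.mod_eq_zero_iff_dvd m _).mpr (Int.gcd_dvd_right _ _), ?_⟩
        rw [PySem.List.mem_pyRange_iff_of_pos]
        · refine ⟨by omega, hj, by simpa using Int.gcd_dvd_left (j : Int) m⟩
        · have hg0 : Int.gcd (j : Int) m ≠ 0 := by
            intro h0
            have := (Int.gcd_eq_zero_iff.mp h0).2
            omega
          omega
  cases hgb : (Int.gcd (j : Int) m == 1) with
  | true =>
    rw [beq_iff_eq] at hgb
    simp only [Bool.not_true]
    rw [← Bool.not_eq_true]
    intro hc
    exact (key.mp hc) hgb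
  | false =>
    rw [beq_eq_false_iff_ne] at hgb
    simp only [Bool.not_false]
    exact key.mpr hgb

/-- The sieve table is the coprimality-complement bitmap of `range(m)`. -/
lemma marked_eq (m : Int) (hm : 1 < m) :
    ((PySem.List.pyRange 2 (m + 1) 1).foldl
      (fun mk d =>
        if PySem.Int.mod m d == 0 then
          (PySem.List.pyRange 0 m d).foldl (fun l k => l.set k.toNat true) mk
        else mk)
      (List.replicate m.toNat false))
    = (PySem.List.pyRange 0 m 1).map (fun r => !(Int.gcd r m == 1)) := by
  have hds : ∀ d ∈ PySem.List.pyRange 2 (m + 1) 1, 0 < d := by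
    intro d hd
    have := (PySem.List.mem_pyRange_one.mp hd).1
    omega
  have hlen : ((PySem.List.pyRange 2 (m + 1) 1).foldl
      (fun mk d =>
        if PySem.Int.mod m d == 0 then
          (PySem.List.pyRange 0 m d).foldl (fun l k => l.set k.toNat true) mk
        else mk)
      (List.replicate m.toNat false)).length = m.toNat := by
    rw [length_sieve, List.length_replicate]
  apply List.ext_getElem
  · rw [hlen, List.length_map, PySem.List.length_pyRange_one]
    omega
  · intro j hj1 hj2
    have hjn : j < m.toNat := by rwa [hlen] at hj1
    have hjm : (j : Int) < m := by omega
    rw [← List.getD_eq_getElem _ false hj1]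
    rw [get_sieve m _ hds _ j (by rw [List.length_replicate]; exact hjn)]
    rw [List.getElem_map, PySem.List.getElem_pyRange_one]
    have hrep : (List.replicate m.toNat false).getD j false = false := by
      simp
    rw [hrep, sieve_hit m hm j hjm]
    simp

-- ---- B side: the run scan ----

/-- Symbolic state of B's run scan: `G ps b r a bnd` is the (best, run) pair after
scanning cells a..bnd-1 whose unmarked positions are exactly `ps`, starting from
best `b` and current run `r`. -/
def G : List Int → Int → Int → Int → Int → Int × Int
  | [], b, r, a, bnd => (max b (r + (bnd - a)), r + (bnd - a))
  | q :: qs, b, r, a, bnd => G qs (max b (r + (q - a))) 0 (q + 1) bnd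

lemma G_shift (ps : List Int) (b r a bnd : Int) (h1 : a + 1 ≤ bnd)
    (h2 : ∀ q ∈ ps, a + 1 ≤ q) :
    G ps (max b (r + 1)) (r + 1) (a + 1) bnd = G ps b r a bnd := by
  cases ps with
  | nil =>
    simp only [G, Prod.mk.injEq]
    constructor <;> omega
  | cons q qs =>
    have hq : a + 1 ≤ q := h2 q (by simp)
    simp only [G]
    rw [show max (max b (r + 1)) (r + 1 + (q - (a + 1))) = max b (r + (q - a)) from by omega]

/-- B's scan over the flag bitmap equals the symbolic run state on the unmarked positions. -/
lemma runG (f : Int → Bool) (bnd : Int) : ∀ (k : Nat) (a b r : Int),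
    (bnd - a).toNat = k → a ≤ bnd → 0 ≤ r → r ≤ b →
    ((PySem.List.pyRange a bnd 1).map f).foldl
        (fun (s : Int × Int) flag =>
          if flag then ((if s.2 + 1 > s.1 then s.2 + 1 else s.1), s.2 + 1) else (s.1, 0))
        (b, r)
      = G ((PySem.List.pyRange a bnd 1).filter (fun x => !(f x))) b r a bnd := by
  intro k
  induction k with
  | zero =>
    intro a b r hk hab hr hrb
    have hba : bnd = a := by omega
    subst hba
    rw [PySem.List.pyRange_one_eq_nil (le_refl _)]
    simp only [List.map_nil, List.foldl_nil, List.filter_nil, G, Prod.mk.injEq]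
    constructor <;> omega
  | succ n ih =>
    intro a b r hk hab hr hrb
    have hlt : a < bnd := by omega
    rw [PySem.List.pyRange_one_cons hlt]
    by_cases hfa : f a = true
    · simp only [List.map_cons, List.foldl_cons, List.filter_cons, hfa, Bool.not_true,
        Bool.false_eq_true, if_false, if_true]
      rw [show (if r + 1 > b then r + 1 else b) = max b (r + 1) from by split_ifs <;> omega]
      rw [ih (a + 1) (max b (r + 1)) (r + 1) (by omega) (by omega) (by omega) (le_max_right _ _)]
      apply G_shift
      · omega
      · intro q hq
        have := (PySem.List.mem_pyRange_one.mp (List.mem_filter.mp hq).1).1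
        omega
    · simp only [Bool.not_eq_true] at hfa
      simp only [List.map_cons, List.foldl_cons, List.filter_cons, hfa, Bool.not_false,
        Bool.false_eq_true, if_false, if_true]
      rw [ih (a + 1) b 0 (by omega) (by omega) (le_refl _) (by omega)]
      simp only [G]
      rw [show max b (r + (a - a)) = b from by omega]

/-- Folding B's wraparound formula over the symbolic state gives A's gap maximum. -/
lemma G_spec (m : Int) : ∀ (t : List Int) (b p : Int),
    max (G t b 0 (p + 1) m).1 ((G t b 0 (p + 1) m).2 + 1) + 1
      = max (maxDiffs (b + 1) (p :: t)) (m - lastD p t + 1) := by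
  intro t
  induction t with
  | nil =>
    intro b p
    simp only [G, maxDiffs, lastD]
    omega
  | cons q t' ih =>
    intro b p
    simp only [G]
    have harg : max b (0 + (q - (p + 1))) = max b (q - p - 1) := by omega
    rw [harg, ih (max b (q - p - 1)) q]
    have hb' : max b (q - p - 1) + 1 = max (b + 1) (q - p) := by omega
    rw [hb']
    rfl

/-- The coprime residues of m ≥ 2 start with 1 (0 is never coprime, 1 always is). -/
lemma cs_cons (m : Int) (hm : 1 < m) :
    (PySem.List.pyRange 0 m 1).filter (fun r => Int.gcd r m == 1)
      = 1 :: (PySem.List.pyRange 2 m 1).filter (fun r => Int.gcd r m == 1) := by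
  rw [PySem.List.pyRange_one_cons (by omega : (0 : Int) < m)]
  rw [show (0 : Int) + 1 = 1 by norm_num]
  rw [PySem.List.pyRange_one_cons (by omega : (1 : Int) < m)]
  rw [show (1 : Int) + 1 = 2 by norm_num]
  simp [List.filter_cons]
  omega

/-- The two programs agree. -/
lemma jacobsthal_eq_alt (m : Int) : jacobsthal m = jacobsthal_alt m := by
  by_cases hm : m ≤ 1
  · simp [jacobsthal, jacobsthal_alt, hm]
  · have hm1 : 1 < m := by omega
    set t := (PySem.List.pyRange 2 m 1).filter (fun r => Int.gcd r m == 1) with ht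
    have hcs := cs_cons m hm1
    have htlt : ∀ x ∈ t, x < m := by
      intro x hx
      exact (PySem.List.mem_pyRange_one.mp (List.mem_filter.mp hx).1).2
    have hlast : lastD 1 t < m := by
      rcases lastD_mem 1 t with h | h
      · omega
      · exact htlt _ h
    -- A side
    have hpair : ((PySem.List.pyRange 0 m 1).filter (fun r => Int.gcd r m == 1)).Pairwise (· < ·) :=
      (PySem.List.pairwise_lt_pyRange_one 0 m).filter _
    have hsorted : ((PySem.List.pyRange 0 m 1).filter
        (fun r => Int.gcd r m == 1)).mergeSort (fun a b => a ≤ b)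
        = (PySem.List.pyRange 0 m 1).filter (fun r => Int.gcd r m == 1) :=
      List.mergeSort_of_pairwise (hpair.imp fun h => by simp [le_of_lt h])
    have hsall : ((PySem.List.pyRange 0 m 1).filter
        (fun r => Int.gcd r m == 1)).mergeSort (fun a b => a ≤ b) = 1 :: t :=
      hsorted.trans hcs
    have hA : jacobsthal m = max (maxDiffs 0 (1 :: t)) ((m - lastD 1 t) + 1) := by
      unfold jacobsthal
      rw [if_neg hm]
      simp only [hsall]
      rw [if_neg (by simp : (1 :: t : List Int) ≠ [])]
      exact Aside m 1 t
    -- B side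
    have hB : jacobsthal_alt m
        = max (maxDiffs (1 + 1) (1 :: t)) (m - lastD 1 t + 1) := by
      unfold jacobsthal_alt
      rw [if_neg hm]
      simp only [marked_eq m hm1]
      rw [runG (fun r => !(Int.gcd r m == 1)) m m.toNat 0 0 0 (by omega) (by omega)
        (le_refl _) (le_refl _)]
      have hff : ((PySem.List.pyRange 0 m 1).filter (fun x => !(!(Int.gcd x m == 1))))
          = (PySem.List.pyRange 0 m 1).filter (fun r => Int.gcd r m == 1) := by
        apply List.filter_congr
        intro x _
        simp
      rw [hff, hcs]
      simp only [G]
      have harg : max 0 (0 + ((1 : Int) - 0)) = 1 := by omega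
      rw [harg]
      exact G_spec m t 1 1
    rw [hA, hB]
    have h2 : maxDiffs (1 + 1) (1 :: t) = max (maxDiffs 0 (1 :: t)) 2 := by
      rw [show ((1 : Int) + 1) = max 0 2 by norm_num, maxDiffs_max]
    rw [h2]
    omega

-- ===== VERDICT (by name: the statement is the Claim_ definition above) =====
theorem jacobsthal_spec : Claim_equal_jacobsthal := by
  intro m _
  unfold Spec_jacobsthal
  exact jacobsthal_eq_alt m
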